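-- pv_equiv track=rewrite | github.com/diana-dr/Problem-3 | Main.py | composeLists
-- ===== SOURCE A (Python) =====
-- def composeLists(lst, indexes):
--     """
--     :param lst: list of integers
--     :param indexes: list of integers
--     :return: lists of integers, one containing the elements of lst on positions given by the indexes list,
--         the other list containing the remaining elements of lst
--     """
--     b = []
--     for i in range(len(lst)):
--         if i in indexes:
--             b.append(lst[i])
--
--     c = []
--     for i in range(len(lst)):
--         if i not in indexes:
--             c.append(lst[i])
--
--     return b, c
-- ===== SOURCE B (Python) =====
-- def composeLists(lst, indexes):
--     """Single-pass partition: one loop over positions, appending to b or c."""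
--     idx = set(indexes)
--     b, c = [], []
--     for i, x in enumerate(lst):
--         if i in idx:
--             b.append(x)
--         else:
--             c.append(x)
--     return b, c
-- ===== Notes on version B (the rewrite author's own statement) =====
-- stated objective: faster
-- what changed: Replaces A's two full scans (each with an O(len(indexes)) linear membership test per position) by one single pass over enumerate(lst) that partitions into both output lists at once, using a set for membership.
import Mathlib
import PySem

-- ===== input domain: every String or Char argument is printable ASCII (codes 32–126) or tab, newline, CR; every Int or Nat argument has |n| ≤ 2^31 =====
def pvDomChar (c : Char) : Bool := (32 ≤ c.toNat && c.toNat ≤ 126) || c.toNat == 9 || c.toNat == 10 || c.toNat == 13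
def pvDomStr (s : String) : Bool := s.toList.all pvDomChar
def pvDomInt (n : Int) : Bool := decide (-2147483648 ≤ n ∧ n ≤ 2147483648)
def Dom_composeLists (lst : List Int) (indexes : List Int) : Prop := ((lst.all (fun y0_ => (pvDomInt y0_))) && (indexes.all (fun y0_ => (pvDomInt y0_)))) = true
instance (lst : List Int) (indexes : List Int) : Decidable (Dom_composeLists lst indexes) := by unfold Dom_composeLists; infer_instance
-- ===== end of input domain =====

-- B replaces A's two full scans over the positions by one single-pass partition
-- (with a set for the membership test); objective: faster.

-- ===== PORT A =====
-- two separate index loops, each testing `i in indexes` and appending;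
-- lst[i] is always in range here, so pyGetD with default 0 is exact
def composeLists (lst : List Int) (indexes : List Int) : List Int × List Int :=
  let b := (PySem.List.pyRange 0 (lst.length : Int) 1).foldl
      (fun acc i => if i ∈ indexes then acc ++ [PySem.List.pyGetD lst i 0] else acc) []
  let c := (PySem.List.pyRange 0 (lst.length : Int) 1).foldl
      (fun acc i => if i ∉ indexes then acc ++ [PySem.List.pyGetD lst i 0] else acc) []
  (b, c)

-- ===== PORT B =====
-- single pass over enumerate(lst), membership against a set, both lists at once
def composeLists_alt (lst : List Int) (indexes : List Int) : List Int × List Int :=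
  let idx := PySem.Set.ofList indexes
  (PySem.List.enumerate lst).foldl
      (fun (acc : List Int × List Int) (p : Int × Int) =>
        if p.1 ∈ idx then (acc.1 ++ [p.2], acc.2) else (acc.1, acc.2 ++ [p.2]))
      ([], [])

-- ===== PRECONDITION & SPEC =====
def Spec_composeLists (lst : List Int) (indexes : List Int) (out : List Int × List Int) : Prop := out = composeLists_alt lst indexes
instance (lst : List Int) (indexes : List Int) (out : List Int × List Int) : Decidable (Spec_composeLists lst indexes out) := by unfold Spec_composeLists; infer_instance

-- ===== CLAIM (what is proved, stated in full; the proofs are below) =====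
def Claim_equal_composeLists : Prop := ∀ (lst : List Int) (indexes : List Int), Dom_composeLists lst indexes → Spec_composeLists lst indexes (composeLists lst indexes)

-- ===== LEMMAS AND PROOFS =====

-- B's pair-fold partitions: accumulators split into filters of the two branches
theorem pair_foldl (P : Int × Int → Prop) [DecidablePred P] (l : List (Int × Int)) :
    ∀ (b c : List Int),
      l.foldl (fun acc p => if P p then (acc.1 ++ [p.2], acc.2) else (acc.1, acc.2 ++ [p.2])) (b, c)
      = (b ++ (l.filter (fun p => decide (P p))).map Prod.snd,
         c ++ (l.filter (fun p => !decide (P p))).map Prod.snd) := by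
  induction l with
  | nil => intro b c; simp
  | cons p l ih =>
      intro b c
      by_cases h : P p <;> simp [h, ih]

-- enumerate started at s+1 is enumerate started at s with all indices shifted
theorem enumerate_shift (xs : List Int) : ∀ (s : Int),
    PySem.List.enumerate xs (s + 1) = (PySem.List.enumerate xs s).map (fun p => (p.1 + 1, p.2)) := by
  induction xs with
  | nil => intro s; simp [PySem.List.enumerate]
  | cons x xs ih => intro s; simp [PySem.List.enumerate_cons, ih]

-- the bridge between A's index-based selection and B's enumerate-based one
theorem range_enum (lst : List Int) : ∀ (Q : Int → Bool),
    ((List.range lst.length).filter (fun (k : Nat) => Q (k : Int))).map (fun k => lst.getD k 0)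
    = ((PySem.List.enumerate lst 0).filter (fun p => Q p.1)).map Prod.snd := by
  induction lst with
  | nil => intro Q; simp [PySem.List.enumerate]
  | cons x xs ih =>
      intro Q
      rw [List.length_cons, List.range_succ_eq_map, PySem.List.enumerate_cons, enumerate_shift xs 0]
      have key := ih (fun i => Q (i + 1))
      simp only [List.getD_eq_getElem?_getD] at key
      by_cases h : Q 0 = true <;>
        simp [h, List.filter_map, List.map_map, Function.comp_def, Nat.succ_eq_add_one, key]

-- ===== VERDICT (by name: the statement is the Claim_ definition above) =====
theorem composeLists_spec : Claim_equal_composeLists := by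
  intro lst indexes _
  unfold Spec_composeLists composeLists composeLists_alt
  dsimp only
  rw [pair_foldl (fun p : Int × Int => p.1 ∈ PySem.Set.ofList indexes) (PySem.List.enumerate lst) [] []]
  simp only [PySem.Set.mem_ofList, List.nil_append]
  rw [show ((lst.length : Int)) = ((lst.length : Nat) : Int) from rfl, PySem.List.pyRange_zero_nat]
  simp only [List.foldl_map, PySem.List.pyGetD_natCast]
  rw [show (fun (acc : List Int) (k : Nat) => if (k : Int) ∈ indexes then acc ++ [lst.getD k 0] else acc)
        = (fun acc k => if (fun k : Nat => decide ((k : Int) ∈ indexes)) k = true then acc ++ [lst.getD k 0] else acc) by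
      funext acc k; by_cases h : (k : Int) ∈ indexes <;> simp [h]]
  rw [show (fun (acc : List Int) (k : Nat) => if (k : Int) ∉ indexes then acc ++ [lst.getD k 0] else acc)
        = (fun acc k => if (fun k : Nat => !decide ((k : Int) ∈ indexes)) k = true then acc ++ [lst.getD k 0] else acc) by
      funext acc k; by_cases h : (k : Int) ∈ indexes <;> simp [h]]
  rw [PySem.List.foldl_append_if (fun k : Nat => decide ((k : Int) ∈ indexes)) (fun k => lst.getD k 0),
      PySem.List.foldl_append_if (fun k : Nat => !decide ((k : Int) ∈ indexes)) (fun k => lst.getD k 0)]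
  simp only [List.nil_append]
  exact Prod.ext (range_enum lst (fun i => decide (i ∈ indexes)))
                 (range_enum lst (fun i => !decide (i ∈ indexes)))
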